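-- pv_equiv track=rewrite | github.com/envomp/2018-Introduction-to-Programming | kt3/exam.py | list_move
-- ===== SOURCE A (Python) =====
-- def list_move(initial_list: list, amount: int, factor: int) -> list:
--     """
--     Create amount lists where elements are shifted right by factor.
--
--     This function creates a list with amount of lists inside it.
--     In each sublist, elements are shifted right by factor elements.
--     factor >= 0
--
--     list_move(["a", "b", "c"], 3, 0) => [['a', 'b', 'c'], ['a', 'b', 'c'], ['a', 'b', 'c']]
--     list_move(["a", "b", "c"], 3, 1) => [['a', 'b', 'c'], ['c', 'a', 'b'], ['b', 'c', 'a']]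
--     list_move([1, 2, 3], 3, 2) => [[1, 2, 3], [2, 3, 1], [3, 1, 2]]
--     list_move([1, 2, 3], 4, 1) => [[1, 2, 3], [3, 1, 2], [2, 3, 1], [1, 2, 3]]
--     list_move([], 3, 4) => [[], [], []]
--     """
--     result = []
--     if factor > len(initial_list) and len(initial_list) > 0:
--         factor = factor % len(initial_list)
--     for i in range(amount):
--         result.append(initial_list)
--         initial_list = initial_list[-factor:] + initial_list[:-factor]
--     return result
-- ===== SOURCE B (Python) =====
-- def list_move(initial_list: list, amount: int, factor: int) -> list:
--     """Each rotation computed directly from its total shift (i*factor) mod n,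
--     instead of chaining successive rotations."""
--     n = len(initial_list)
--
--     def rot(i):
--         if n == 0:
--             return []
--         s = (i * factor) % n
--         return initial_list[n - s:] + initial_list[:n - s]
--
--     return [rot(i) for i in range(amount)]
-- ===== Notes on version B (the rewrite author's own statement) =====
-- stated objective: alternative
-- what changed: Each of the amount sublists is computed independently as a direct rotation by its total shift (i*factor) mod n, replacing A's chained loop that rebinds the accumulator by re-slicing the previous rotation.
-- outside the precondition, e.g. on list_move(['a', 'b'], 2, -3): A returns [['a', 'b'], ['a', 'b']], B returns [['a', 'b'], ['b', 'a']]
import Mathlib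
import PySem

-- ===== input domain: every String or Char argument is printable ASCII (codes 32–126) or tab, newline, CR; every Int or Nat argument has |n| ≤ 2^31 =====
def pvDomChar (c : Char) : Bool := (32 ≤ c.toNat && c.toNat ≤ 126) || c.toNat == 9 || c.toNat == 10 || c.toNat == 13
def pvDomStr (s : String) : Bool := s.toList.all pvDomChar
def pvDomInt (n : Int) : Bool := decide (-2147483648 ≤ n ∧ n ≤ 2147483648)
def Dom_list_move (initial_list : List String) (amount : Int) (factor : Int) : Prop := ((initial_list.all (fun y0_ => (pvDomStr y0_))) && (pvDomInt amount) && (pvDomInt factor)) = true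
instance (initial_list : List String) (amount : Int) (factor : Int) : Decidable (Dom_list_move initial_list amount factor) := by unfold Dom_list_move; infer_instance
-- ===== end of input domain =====

-- B computes each of the `amount` sublists independently as a direct rotation by its total
-- shift (i*factor) mod n, instead of A's chained loop re-slicing the previous rotation.


-- ===== PORT A =====
def list_move (initial_list : List String) (amount : Int) (factor : Int) : List (List String) :=
  let n : Int := (initial_list.length : Int)
  let factor' : Int := if factor > n ∧ 0 < n then PySem.Int.mod factor n else factor
  ((PySem.List.pyRange 0 amount 1).foldl
    (fun (st : List (List String) × List String) _ =>
      (st.1 ++ [st.2],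
       PySem.List.slice st.2 (some (-factor')) none ++ PySem.List.slice st.2 none (some (-factor'))))
    ([], initial_list)).1

-- ===== PORT B =====
def list_move_alt (initial_list : List String) (amount : Int) (factor : Int) : List (List String) :=
  let n : Int := (initial_list.length : Int)
  let rot : Int → List String := fun i =>
    if n = 0 then []
    else
      let s : Int := PySem.Int.mod (i * factor) n
      PySem.List.slice initial_list (some (n - s)) none ++
        PySem.List.slice initial_list none (some (n - s))
  (PySem.List.pyRange 0 amount 1).map rot

-- ===== PRECONDITION & SPEC =====
-- The docstring's domain is factor >= 0; Pre_ keeps that, every factor ≥ -len (where A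
-- still performs the documented rotation), and the factor < -len inputs on which the two
-- programs agree anyway (empty list, amount ≤ 1, factor a multiple of len). It excludes
-- only factor < -len(initial_list) with a nontrivial rotation pending — outside the
-- documented domain, where A's out-of-range slices stop rotating while B rotates: an
-- unspecified corner on which either value is as defensible as the other.
def Pre_list_move (initial_list : List String) (amount : Int) (factor : Int) : Prop :=
  -(initial_list.length : Int) ≤ factor ∨ initial_list = [] ∨ amount ≤ 1 ∨
    PySem.Int.mod factor (initial_list.length : Int) = 0
instance (initial_list : List String) (amount : Int) (factor : Int) : Decidable (Pre_list_move initial_list amount factor) := by unfold Pre_list_move; infer_instance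

def pvWitness_list_move : List String × Int × Int := (["a", "b", "c"], 4, 2)

def Spec_list_move (initial_list : List String) (amount : Int) (factor : Int) (out : List (List String)) : Prop := out = list_move_alt initial_list amount factor
instance (initial_list : List String) (amount : Int) (factor : Int) (out : List (List String)) : Decidable (Spec_list_move initial_list amount factor out) := by unfold Spec_list_move; infer_instance

-- ===== CLAIM (what is proved, stated in full; the proofs are below) =====
def Claim_equal_list_move : Prop := ∀ (initial_list : List String) (amount : Int) (factor : Int), Dom_list_move initial_list amount factor → Pre_list_move initial_list amount factor → Spec_list_move initial_list amount factor (list_move initial_list amount factor)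

-- ===== LEMMAS AND PROOFS =====

-- A's loop body as a function of the (reduced) factor.
def pvStepA (f : Int) (l : List String) : List String :=
  PySem.List.slice l (some (-f)) none ++ PySem.List.slice l none (some (-f))

theorem pvStepA_nil (f : Int) : pvStepA f [] = [] := by
  simp [pvStepA, PySem.List.slice]

-- On a list of length n > 0, with -n ≤ f ≤ n, A's step is a left rotation by (-f) mod n.
theorem pvStepA_rotate (f : Int) (l : List String) (hn : 0 < l.length)
    (hlo : -(l.length : Int) ≤ f) (hhi : f ≤ (l.length : Int)) :
    pvStepA f l = l.rotate (((-f) % (l.length : Int)).toNat) := by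
  by_cases hf : f ≤ 0
  · -- -f = (e : Nat) with e ≤ length
    obtain ⟨e, he⟩ : ∃ e : Nat, -f = (e : Int) := ⟨(-f).toNat, by omega⟩
    have heL : e ≤ l.length := by omega
    rw [pvStepA, he, PySem.List.slice_from_natCast, PySem.List.slice_to_natCast,
      ← List.rotate_eq_drop_append_take heL]
    by_cases hEq : e = l.length
    · subst hEq
      rw [List.rotate_length]
      rw [Int.emod_self]
      simp
    · have : ((e : Int)) % (l.length : Int) = (e : Int) :=
        Int.emod_eq_of_lt (by omega) (by omega)
      rw [this]
      simp
  · -- f = (k : Nat), 0 < k ≤ length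
    push_neg at hf
    obtain ⟨k, hk⟩ : ∃ k : Nat, f = (k : Int) := ⟨f.toNat, by omega⟩
    have hk0 : 0 < k := by omega
    have hkL : k ≤ l.length := by omega
    rw [pvStepA, hk, PySem.List.slice_from_neg_natCast l k hk0, PySem.List.slice_to_neg_natCast l k hk0,
      ← List.rotate_eq_drop_append_take (by omega : l.length - k ≤ l.length)]
    congr 1
    have : (-(k : Int)) % (l.length : Int) = ((l.length - k : Nat) : Int) := by
      by_cases hEq : k = l.length
      · subst hEq; simp
      · have h1 : (-(k : Int)) % (l.length : Int)
            = ((l.length : Int) - k) % (l.length : Int) := by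
          have := Int.add_mul_emod_self_left (a := -(k : Int)) (b := (l.length : Int)) (c := 1)
          have hrw : -(k : Int) + (l.length : Int) * 1 = (l.length : Int) - k := by ring
          rw [hrw] at this
          omega
        rw [h1, Int.emod_eq_of_lt (by omega) (by omega)]
        omega
    omega

-- for f < -len, both of A's slices degenerate and the step is the identity
theorem pvStepA_id_of_lt (f : Int) (l : List String) (h : f < -(l.length : Int)) :
    pvStepA f l = l := by
  have h1 : l.length ≤ (-f).toNat := by omega
  rw [pvStepA, PySem.List.slice_from l (by omega : (0:Int) ≤ -f),
    PySem.List.slice_to l (by omega : (0:Int) ≤ -f),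
    List.drop_eq_nil_of_le h1, List.take_of_length_le h1]
  simp

-- rotating twice adds the shifts
theorem pvRotate_congr (l : List String) (a b : Nat) (h : a % l.length = b % l.length) :
    l.rotate a = l.rotate b := by
  rw [← List.rotate_mod l a, ← List.rotate_mod l b, h]

-- A's foldl, on any index list, produces the iterates of the step.
theorem pvFoldA (f : Int) (ts : List Int) (acc : List (List String)) (l : List String) :
    (ts.foldl
      (fun (st : List (List String) × List String) _ => (st.1 ++ [st.2], pvStepA f st.2))
      (acc, l)).1
      = acc ++ (List.range ts.length).map (fun j => (pvStepA f)^[j] l) := by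
  induction ts generalizing acc l with
  | nil => simp
  | cons t ts ih =>
    rw [List.foldl_cons, ih]
    simp only [List.length_cons, List.range_succ_eq_map, List.map_cons, List.map_map]
    simp [Function.comp_def, Function.iterate_succ_apply]
-- iterates of the step are rotations
theorem pvIterA (f : Int) (l : List String) (hn : 0 < l.length)
    (hlo : -(l.length : Int) ≤ f) (hhi : f ≤ (l.length : Int)) (j : Nat) :
    (pvStepA f)^[j] l = l.rotate (j * ((-f) % (l.length : Int)).toNat) := by
  induction j with
  | zero => simp
  | succ j ih =>
    rw [Function.iterate_succ_apply', ih]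
    rw [pvStepA_rotate f _ (by simpa using hn) (by simpa using hlo) (by simpa using hhi)]
    rw [List.rotate_rotate, List.length_rotate]
    congr 1
    ring

theorem pvIter_nil (f : Int) (j : Nat) : (pvStepA f)^[j] ([] : List String) = [] := by
  induction j with
  | zero => rfl
  | succ j ih => rw [Function.iterate_succ_apply', ih, pvStepA_nil]

-- ===== VERDICT (by name: the statement is the Claim_ definition above) =====
theorem list_move_spec : Claim_equal_list_move := by
  intro l amount factor _hdom hpre
  unfold Spec_list_move list_move list_move_alt
  simp only []
  set n : Int := (l.length : Int) with hn
  set f : Int := if factor > n ∧ 0 < n then PySem.Int.mod factor n else factor with hf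
  simp only [← pvStepA.eq_def]
  rw [pvFoldA f _ [], List.nil_append]
  rw [PySem.List.pyRange_one 0 amount]
  simp only [List.length_map, List.length_range, List.map_map]
  apply List.map_congr_left
  intro j hj
  simp only [Function.comp_apply, zero_add]
  by_cases h0 : l.length = 0
  · have hl : l = [] := List.eq_nil_of_length_eq_zero h0
    rw [if_pos (by omega), hl, pvIter_nil]
  · have hnpos : (0 : Int) < n := by omega
    by_cases hmain : -n ≤ factor
    case neg =>
      -- factor < -n: A's step is the identity and B's shift is 0 on every admitted input
      have hfred : f = factor := by
        rw [hf, if_neg]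
        rintro ⟨h1, h2⟩
        omega
      rw [if_neg (by omega), hfred,
        Function.iterate_fixed (pvStepA_id_of_lt factor l (by omega)) j]
      have hs0 : PySem.Int.mod ((j : Int) * factor) n = 0 := by
        rcases hpre with h | h | h | h
        · omega
        · rw [h] at h0; simp at h0
        · have hj' : j < (amount - 0).toNat := List.mem_range.mp hj
          have hj0 : j = 0 := by omega
          subst hj0
          rw [PySem.Int.mod_eq_emod_of_pos hnpos]
          simp
        · rw [PySem.Int.mod_eq_emod_of_pos hnpos] at h ⊢
          rw [Int.mul_emod, h]
          simp
      rw [hs0, sub_zero, hn, PySem.List.slice_from_natCast, PySem.List.slice_to_natCast]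
      simp
    have hfmod : f % n = factor % n := by
      rw [hf]
      split
      · rw [PySem.Int.mod_eq_emod_of_pos hnpos, Int.emod_emod_of_dvd _ dvd_rfl]
      · rfl
    have hflo : -n ≤ f := by
      rw [hf]; split
      · rw [PySem.Int.mod_eq_emod_of_pos hnpos]
        have := Int.emod_nonneg factor (by omega : n ≠ 0)
        omega
      · exact hmain
    have hfhi : f ≤ n := by
      rw [hf]; split
      · rw [PySem.Int.mod_eq_emod_of_pos hnpos]
        have := Int.emod_lt_of_pos factor hnpos
        omega
      · rename_i h
        push_neg at h
        by_cases hc : n < factor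
        · have := h hc; omega
        · omega
    rw [if_neg (by omega), pvIterA f l (by omega) (by rw [← hn]; exact hflo) (by rw [← hn]; exact hfhi)]
    -- B's entry: slices with nonnegative in-range index n - s
    set s : Int := PySem.Int.mod ((j : Int) * factor) n with hs
    have hsE : s = ((j : Int) * factor) % n := by
      rw [hs, PySem.Int.mod_eq_emod_of_pos hnpos]
    have hs0 : 0 ≤ s := by
      rw [hsE]; exact Int.emod_nonneg _ (by omega)
    have hsn : s < n := by
      rw [hsE]; exact Int.emod_lt_of_pos _ hnpos
    obtain ⟨e, he⟩ : ∃ e : Nat, n - s = (e : Int) := ⟨(n - s).toNat, by omega⟩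
    have heL : e ≤ l.length := by omega
    rw [he, PySem.List.slice_from_natCast, PySem.List.slice_to_natCast,
      ← List.rotate_eq_drop_append_take heL]
    apply pvRotate_congr
    -- j * ((-f) mod n).toNat and e are congruent mod l.length
    have hm : (((-f) % n).toNat : Int) = (-f) % n := by
      have := Int.emod_nonneg (-f) (by omega : n ≠ 0)
      omega
    have chain : ((j : Int) * (((-f) % n).toNat : Int)) % n = ((e : Int)) % n := by
      rw [hm]
      have d1 : Int.ModEq n ((j : Int) * ((-f) % n)) ((j : Int) * (-f)) :=
        Int.ModEq.mul_left _ (Int.emod_emod_of_dvd (-f) dvd_rfl)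
      have d2 : Int.ModEq n ((j : Int) * (-f)) (-((j : Int) * factor)) := by
        have hmf : Int.ModEq n f factor := hfmod
        have h5 := (Int.ModEq.mul_left (j : Int) hmf).neg
        have hrw : -((j : Int) * f) = (j : Int) * (-f) := by ring
        rw [hrw] at h5
        exact h5
      have hjs : Int.ModEq n ((j : Int) * factor) s := by
        show ((j : Int) * factor) % n = s % n
        rw [hsE, Int.emod_emod_of_dvd _ dvd_rfl]
      have d3 := hjs.neg
      have d4 : Int.ModEq n (-s) ((e : Int)) := by
        show (-s) % n = ((e : Int)) % n
        rw [← he]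
        have h6 := Int.add_mul_emod_self_left (a := -s) (b := n) (c := 1)
        have hrw2 : -s + n * 1 = n - s := by ring
        rw [hrw2] at h6
        omega
      exact ((d1.trans d2).trans d3).trans d4
    have hcast : ((j * ((-f) % n).toNat % l.length : Nat) : Int) = ((e % l.length : Nat) : Int) := by
      rw [Int.natCast_mod, Int.natCast_mod, Nat.cast_mul]
      rw [hn] at chain
      exact chain
    exact_mod_cast hcast
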